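-- pv_equiv track=rewrite | github.com/JLMin/Python-Challenge | level07.py | seprate_block
-- ===== SOURCE A (Python) =====
-- def seprate_block(grays):
--     count, maxsize = 1, 8
--     pre = None
--     out = ''
--     for cur in grays:
--         if cur != pre:
--             out += chr(cur)
--             count = 1
--             pre = cur
--         else:
--             if count < maxsize:
--                 count += 1
--             else:
--                 count = 1
--                 pre = None
--     return out
-- ===== SOURCE B (Python) =====
-- def seprate_block(grays):
--     out = []
--     i, n = 0, len(grays)
--     while i < n:
--         j = i
--         while j < n and grays[j] == grays[i]:
--             j += 1
--         out.append(chr(grays[i]) * ((j - i + 8) // 9))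
--         i = j
--     return ''.join(out)
-- ===== Notes on version B (the rewrite author's own statement) =====
-- stated objective: simpler
-- what changed: Replaces A's per-element state machine (count/pre/reset at 8) by a run-length scan: split grays into maximal runs of equal values and emit chr(v) ceil(L/9) times per run of length L.
-- outside the precondition, e.g. on seprate_block([1114112]): A raises ValueError, B raises ValueError
import Mathlib
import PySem

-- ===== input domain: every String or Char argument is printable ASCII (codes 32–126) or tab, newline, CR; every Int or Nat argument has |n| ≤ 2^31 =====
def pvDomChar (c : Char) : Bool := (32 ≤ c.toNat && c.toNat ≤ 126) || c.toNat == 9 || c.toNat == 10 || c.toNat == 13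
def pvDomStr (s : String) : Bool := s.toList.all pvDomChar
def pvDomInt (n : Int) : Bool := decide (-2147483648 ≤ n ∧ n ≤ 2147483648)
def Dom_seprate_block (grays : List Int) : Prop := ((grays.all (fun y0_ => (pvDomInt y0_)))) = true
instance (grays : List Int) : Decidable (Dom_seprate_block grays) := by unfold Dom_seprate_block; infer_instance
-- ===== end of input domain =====

-- B replaces A's per-element state machine by a run-length scan with a closed-form count ⌈L/9⌉ per run (objective: simpler).

-- ===== PORT A =====
-- A's loop state: count, pre (None = none), out (string as List Char, appended per emission).
def sbLoop : List Int → Int → Option Int → List Char → List Char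
  | [], _, _, out => out
  | cur :: rest, count, pre, out =>
    if some cur ≠ pre then
      sbLoop rest 1 (some cur) (out ++ [Char.ofNat cur.toNat])
    else
      if count < 8 then sbLoop rest (count + 1) pre out
      else sbLoop rest 1 none out

def seprate_block (grays : List Int) : String :=
  String.mk (sbLoop grays 1 none [])

-- ===== PORT B =====
-- Source B's inner while scans the maximal run of grays[i]; here that scan is takeWhile/dropWhile.
def sbAlt : List Int → List Char
  | [] => []
  | v :: rest =>
    List.replicate (((rest.takeWhile (fun x => x == v)).length + 1 + 8) / 9) (Char.ofNat v.toNat)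
      ++ sbAlt (rest.dropWhile (fun x => x == v))
  termination_by l => l.length
  decreasing_by
    simp only [List.length_cons]
    exact Nat.lt_succ_of_le (List.length_dropWhile_le _ _)

def seprate_block_alt (grays : List Int) : String :=
  String.mk (sbAlt grays)

-- ===== PRECONDITION & SPEC =====
-- Pre_ excludes values that are not valid chr() codepoints (A raises ValueError there) and the
-- surrogate codepoints 0xD800–0xDFFF, where both programs return a one-surrogate Python string
-- that is not representable as a Lean String.
def Pre_seprate_block (grays : List Int) : Prop :=
  ∀ v ∈ grays, 0 ≤ v ∧ v < 1114112 ∧ (v < 55296 ∨ 57343 < v)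
instance (grays : List Int) : Decidable (Pre_seprate_block grays) := by unfold Pre_seprate_block; infer_instance
def pvWitness_seprate_block : List Int := [65, 65, 66]

def Spec_seprate_block (grays : List Int) (out : String) : Prop := out = seprate_block_alt grays
instance (grays : List Int) (out : String) : Decidable (Spec_seprate_block grays out) := by unfold Spec_seprate_block; infer_instance

-- ===== CLAIM (what is proved, stated in full; the proofs are below) =====
def Claim_equal_seprate_block : Prop := ∀ (grays : List Int), Dom_seprate_block grays → Pre_seprate_block grays → Spec_seprate_block grays (seprate_block grays)

-- ===== LEMMAS AND PROOFS =====

theorem sbLoop_run (v : Int) : ∀ (k : Nat) (out : List Char) (rest : List Int),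
    ∃ c' p', (p' = some v ∨ p' = none) ∧
      sbLoop (List.replicate k v ++ rest) 1 (some v) out
        = sbLoop rest c' p' (out ++ List.replicate (k / 9) (Char.ofNat v.toNat)) := by
  intro k
  induction k using Nat.strong_induction_on with
  | _ k ih =>
    intro out rest
    by_cases h : k ≤ 8
    · interval_cases k
      · exact ⟨1, some v, Or.inl rfl, by simp⟩
      · exact ⟨2, some v, Or.inl rfl, by norm_num [sbLoop, List.replicate]⟩
      · exact ⟨3, some v, Or.inl rfl, by norm_num [sbLoop, List.replicate]⟩
      · exact ⟨4, some v, Or.inl rfl, by norm_num [sbLoop, List.replicate]⟩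
      · exact ⟨5, some v, Or.inl rfl, by norm_num [sbLoop, List.replicate]⟩
      · exact ⟨6, some v, Or.inl rfl, by norm_num [sbLoop, List.replicate]⟩
      · exact ⟨7, some v, Or.inl rfl, by norm_num [sbLoop, List.replicate]⟩
      · exact ⟨8, some v, Or.inl rfl, by norm_num [sbLoop, List.replicate]⟩
      · exact ⟨1, none, Or.inr rfl, by norm_num [sbLoop, List.replicate]⟩
    · obtain ⟨m, rfl⟩ : ∃ m, k = 9 + m := ⟨k - 9, by omega⟩
      obtain ⟨c', p', hp, heq⟩ := ih m (by omega) (out ++ [Char.ofNat v.toNat]) rest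
      refine ⟨c', p', hp, ?_⟩
      have h9 : (9 + m) / 9 = m / 9 + 1 := by omega
      rw [show List.replicate (9 + m) v = List.replicate 9 v ++ List.replicate m v from
        (List.replicate_add 9 m v)]
      norm_num [sbLoop, List.replicate, h9] at heq ⊢
      simp [heq]

theorem sbLoop_eq_alt : ∀ (n : Nat) (l : List Int), l.length ≤ n →
    ∀ (c : Int) (p : Option Int) (out : List Char),
      (∀ w, p = some w → l.head? ≠ some w) →
      sbLoop l c p out = out ++ sbAlt l := by
  intro n
  induction n with
  | zero =>
    intro l hl c p out _
    have : l = [] := List.eq_nil_of_length_eq_zero (by omega)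
    subst this; simp [sbLoop, sbAlt]
  | succ n ih =>
    intro l hl c p out hp
    match l with
    | [] => simp [sbLoop, sbAlt]
    | v :: rest =>
      have hpv : some v ≠ p := by
        intro h
        exact hp v h.symm rfl
      have htake : rest.takeWhile (fun x => x == v)
          = List.replicate (rest.takeWhile (fun x => x == v)).length v := by
        rw [List.eq_replicate_iff]
        exact ⟨rfl, fun b hb => by have := List.mem_takeWhile_imp hb; simpa using this⟩
      obtain ⟨c', p', hp', heq⟩ := sbLoop_run v (rest.takeWhile (fun x => x == v)).length
        (out ++ [Char.ofNat v.toNat]) (rest.dropWhile (fun x => x == v))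
      have hdrop : ∀ w, p' = some w →
          (rest.dropWhile (fun x => x == v)).head? ≠ some w := by
        intro w hw hhead
        have h2 := List.head?_dropWhile_not (p := fun y => y == v) (l := rest)
        rw [hhead] at h2
        have h3 : w ≠ v := by simpa using h2
        rcases hp' with h1 | h1 <;> rw [h1] at hw
        · injection hw with h; exact h3 h.symm
        · cases hw
      have step : sbLoop (v :: rest) c p out
          = sbLoop rest 1 (some v) (out ++ [Char.ofNat v.toNat]) := by
        simp [sbLoop, hpv]
      rw [step]
      conv_lhs => rw [← List.takeWhile_append_dropWhile (p := fun x => x == v) (l := rest)]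
      rw [htake]
      rw [heq]
      rw [ih _ (by
          have := List.length_dropWhile_le (fun x => x == v) rest
          simp at hl; omega) c' p' _ hdrop]
      have ht9 : ((rest.takeWhile (fun x => x == v)).length + 1 + 8) / 9
          = (rest.takeWhile (fun x => x == v)).length / 9 + 1 := by omega
      simp [sbAlt, ht9, List.replicate_succ]

-- ===== VERDICT (by name: the statement is the Claim_ definition above) =====
theorem seprate_block_spec : Claim_equal_seprate_block := by
  intro grays _ _
  unfold Spec_seprate_block seprate_block seprate_block_alt
  rw [sbLoop_eq_alt grays.length grays le_rfl 1 none [] (by intro w h; cases h)]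
  rfl
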